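-- pv_equiv track=rewrite | github.com/Mactto/Algorithm | baekjoon/4659_비밀번호발음하기.py | check_continuous_third
-- ===== SOURCE A (Python) =====
-- def check_continuous_third(word: str):
--     vowel = ['a', 'e', 'i', 'o', 'u']
--     word_len = len(word)
--
--     if word_len < 3:
--         return True
--
--     for i in range(word_len - 2):
--         if word[i] in vowel and word[i+1] in vowel and word[i+2] in vowel:
--             return False
--         elif word[i] not in vowel and word[i+1] not in vowel and word[i+2] not in vowel:
--             return False
--     return True
-- ===== SOURCE B (Python) =====
-- def check_continuous_third(word: str):
--     t = ''.join('V' if c in ('a', 'e', 'i', 'o', 'u') else 'C' for c in word)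
--     return 'VVV' not in t and 'CCC' not in t
-- ===== Notes on version B (the rewrite author's own statement) =====
-- stated objective: simpler
-- what changed: B maps the word once to a V/C type string and decides the answer by two substring tests ('VVV'/'CCC' not in t) instead of A's indexed scan of overlapping 3-windows with repeated vowel-list membership tests.
import Mathlib
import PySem

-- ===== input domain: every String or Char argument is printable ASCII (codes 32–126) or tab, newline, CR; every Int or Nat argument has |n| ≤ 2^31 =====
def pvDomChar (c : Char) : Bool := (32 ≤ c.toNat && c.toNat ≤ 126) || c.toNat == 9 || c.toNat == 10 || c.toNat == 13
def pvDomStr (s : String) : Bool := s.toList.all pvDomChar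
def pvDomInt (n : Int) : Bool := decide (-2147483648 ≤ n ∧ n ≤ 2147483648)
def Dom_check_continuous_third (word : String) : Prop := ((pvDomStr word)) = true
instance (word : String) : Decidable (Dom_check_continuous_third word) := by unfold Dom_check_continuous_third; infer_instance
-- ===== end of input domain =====

-- B replaces A's indexed 3-window scan by one map to a V/C type string plus two substring tests (simpler).

-- ===== PORT A =====
-- word[i] in vowel (index always in range when A reads it; none ↦ false is unreachable there)
def pvIsVowelAt (vowel : List Char) (l : List Char) (i : Nat) : Bool :=
  match l[i]? with
  | some c => vowel.contains c
  | none => false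

-- the 'for i in range(word_len - 2)' loop with its two early 'return False' branches
def pvLoopA (vowel : List Char) (l : List Char) : List Nat → Bool
  | [] => true
  | i :: rest =>
    if pvIsVowelAt vowel l i && pvIsVowelAt vowel l (i+1) && pvIsVowelAt vowel l (i+2) then
      false
    else if !pvIsVowelAt vowel l i && !pvIsVowelAt vowel l (i+1) && !pvIsVowelAt vowel l (i+2) then
      false
    else
      pvLoopA vowel l rest

def check_continuous_third (word : String) : Bool :=
  let vowel : List Char := ['a', 'e', 'i', 'o', 'u']
  let l := word.toList
  let word_len := l.length
  if word_len < 3 then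
    true
  else
    pvLoopA vowel l (List.range (word_len - 2))

-- ===== PORT B =====
def pvTypeOf (c : Char) : Char :=
  if ['a', 'e', 'i', 'o', 'u'].contains c then 'V' else 'C'

def check_continuous_third_alt (word : String) : Bool :=
  let t := word.toList.map pvTypeOf
  !(PySem.Chars.isIn ['V', 'V', 'V'] t) && !(PySem.Chars.isIn ['C', 'C', 'C'] t)

-- ===== PRECONDITION & SPEC =====
def Spec_check_continuous_third (word : String) (out : Bool) : Prop := out = check_continuous_third_alt word
instance (word : String) (out : Bool) : Decidable (Spec_check_continuous_third word out) := by unfold Spec_check_continuous_third; infer_instance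

-- ===== CLAIM (what is proved, stated in full; the proofs are below) =====
def Claim_equal_check_continuous_third : Prop := ∀ (word : String), Dom_check_continuous_third word → Spec_check_continuous_third word (check_continuous_third word)

-- ===== LEMMAS AND PROOFS =====

theorem pvPrefix3 (x : Char) (m : List Char) :
    ([x, x, x] <+: m) ↔ (m[0]? = some x ∧ m[1]? = some x ∧ m[2]? = some x) := by
  match m with
  | [] => simp
  | [a] => simp [List.cons_prefix_iff]
  | [a, b] => simp [List.cons_prefix_iff]
  | a :: b :: c :: r => simp [List.cons_prefix_iff, eq_comm]

theorem pvIsIn3 (x : Char) (t : List Char) :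
    PySem.Chars.isIn [x, x, x] t = true ↔
      ∃ j, t[j]? = some x ∧ t[j+1]? = some x ∧ t[j+2]? = some x := by
  rw [← PySem.Chars.exists_prefix_drop_iff_isIn]
  constructor
  · rintro ⟨j, h⟩
    rw [pvPrefix3] at h
    exact ⟨j, by simpa [List.getElem?_drop] using h⟩
  · rintro ⟨j, h⟩
    exact ⟨j, by rw [pvPrefix3]; simpa [List.getElem?_drop] using h⟩

theorem pvVAt (l : List Char) (j : Nat) :
    pvIsVowelAt ['a', 'e', 'i', 'o', 'u'] l j = true ↔ (l.map pvTypeOf)[j]? = some 'V' := by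
  unfold pvIsVowelAt
  rcases h : l[j]? with _ | c <;> simp [h, pvTypeOf]
  tauto

theorem pvCAt (l : List Char) (j : Nat) (hj : j < l.length) :
    pvIsVowelAt ['a', 'e', 'i', 'o', 'u'] l j = false ↔ (l.map pvTypeOf)[j]? = some 'C' := by
  unfold pvIsVowelAt
  rcases h : l[j]? with _ | c
  · exact absurd h (by simp [hj])
  · simp [h, pvTypeOf]

theorem pvLoopA_eq_all (vowel l : List Char) (idxs : List Nat) :
    pvLoopA vowel l idxs =
      idxs.all (fun i =>
        !((pvIsVowelAt vowel l i && pvIsVowelAt vowel l (i+1) && pvIsVowelAt vowel l (i+2)) ||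
          (!pvIsVowelAt vowel l i && !pvIsVowelAt vowel l (i+1) && !pvIsVowelAt vowel l (i+2)))) := by
  induction idxs with
  | nil => rfl
  | cons i rest ih =>
    rw [pvLoopA, List.all_cons, ih]
    cases hA : pvIsVowelAt vowel l i <;> cases hB : pvIsVowelAt vowel l (i+1) <;>
      cases hC : pvIsVowelAt vowel l (i+2) <;> simp

-- index bound from the B side: a triple read at j forces j + 2 < length
theorem pvBound {t : List Char} {j : Nat} {x : Char} (h : t[j+2]? = some x) : j + 2 < t.length := by
  by_contra hc
  simp [List.getElem?_eq_none (le_of_not_gt hc)] at h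

theorem check_continuous_third_eq (word : String) :
    check_continuous_third word = check_continuous_third_alt word := by
  unfold check_continuous_third check_continuous_third_alt
  set l := word.toList with hl
  set t := l.map pvTypeOf with ht
  rw [Bool.eq_iff_iff]
  by_cases hsmall : l.length < 3
  · have hv : PySem.Chars.isIn ['V', 'V', 'V'] t = false := by
      rw [Bool.eq_false_iff]; intro hc
      obtain ⟨j, _, _, h3⟩ := (pvIsIn3 _ _).mp hc
      have := pvBound h3; simp [ht] at this; omega
    have hcns : PySem.Chars.isIn ['C', 'C', 'C'] t = false := by
      rw [Bool.eq_false_iff]; intro hc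
      obtain ⟨j, _, _, h3⟩ := (pvIsIn3 _ _).mp hc
      have := pvBound h3; simp [ht] at this; omega
    simp [hsmall, hv, hcns]
  · simp only [hsmall, if_false]
    rw [pvLoopA_eq_all]
    simp only [List.all_eq_true, List.mem_range, Bool.and_eq_true, Bool.not_eq_true',
      Bool.or_eq_false_iff, Bool.and_eq_false_iff, Bool.not_eq_false']
    constructor
    · intro hall
      have hv : PySem.Chars.isIn ['V', 'V', 'V'] t = false := by
        rw [Bool.eq_false_iff]; intro hc
        obtain ⟨j, h1, h2, h3⟩ := (pvIsIn3 _ _).mp hc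
        have hb := pvBound h3
        simp only [ht, List.length_map] at hb
        have hj : j < l.length - 2 := by omega
        rcases (hall j hj).1 with (h | h) | h
        · exact absurd ((pvVAt l j).mpr h1) (by simp [h])
        · exact absurd ((pvVAt l (j+1)).mpr h2) (by simp [h])
        · exact absurd ((pvVAt l (j+2)).mpr h3) (by simp [h])
      have hcns : PySem.Chars.isIn ['C', 'C', 'C'] t = false := by
        rw [Bool.eq_false_iff]; intro hc
        obtain ⟨j, h1, h2, h3⟩ := (pvIsIn3 _ _).mp hc
        have hb := pvBound h3
        simp only [ht, List.length_map] at hb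
        have hj : j < l.length - 2 := by omega
        rcases (hall j hj).2 with (h | h) | h
        · exact absurd ((pvCAt l j (by omega)).mpr h1) (by simp [h])
        · exact absurd ((pvCAt l (j+1) (by omega)).mpr h2) (by simp [h])
        · exact absurd ((pvCAt l (j+2) (by omega)).mpr h3) (by simp [h])
      simp [hv, hcns]
    · intro hb i hi
      obtain ⟨hbv, hbc⟩ := hb
      constructor
      · by_contra hc
        simp only [not_or, Bool.not_eq_false] at hc
        obtain ⟨⟨h1, h2⟩, h3⟩ := hc
        have : PySem.Chars.isIn ['V', 'V', 'V'] t = true :=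
          (pvIsIn3 _ _).mpr ⟨i, (pvVAt l i).mp h1, (pvVAt l (i+1)).mp h2, (pvVAt l (i+2)).mp h3⟩
        simp [this] at hbv
      · by_contra hc
        simp only [not_or, Bool.not_eq_true] at hc
        obtain ⟨⟨h1, h2⟩, h3⟩ := hc
        have : PySem.Chars.isIn ['C', 'C', 'C'] t = true :=
          (pvIsIn3 _ _).mpr ⟨i, (pvCAt l i (by omega)).mp h1,
            (pvCAt l (i+1) (by omega)).mp h2, (pvCAt l (i+2) (by omega)).mp h3⟩
        simp [this] at hbc

-- ===== VERDICT (by name: the statement is the Claim_ definition above) =====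
theorem check_continuous_third_spec : Claim_equal_check_continuous_third := by
  intro word _
  exact check_continuous_third_eq word
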